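-- pv_equiv track=rewrite | github.com/cgreggescalante/Challenges | ProjectEuler/Incomplete/104.py | check
-- ===== SOURCE A (Python) =====
-- nums = ['1', '2', '3', '4', '5', '6', '7', '8', '9']
--
-- def check(n):
--     s = str(n)[:9]
--
--     needed = nums[:]
--     for c in s:
--         if c in needed:
--             needed.remove(c)
--         else:
--             return False
--
--     if len(needed) != 0:
--         return False
--
--     s = str(n)[-9:]
--
--     needed = nums[:]
--     for c in s:
--         if c in needed:
--             needed.remove(c)
--         else:
--             return False
--
--     return len(needed) == 0
-- ===== SOURCE B (Python) =====
-- nums = ['1', '2', '3', '4', '5', '6', '7', '8', '9']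
--
-- def check(n):
--     s = str(n)
--     return sorted(s[:9]) == nums and sorted(s[-9:]) == nums
-- ===== Notes on version B (the rewrite author's own statement) =====
-- stated objective: simpler
-- what changed: Replaces the two membership-and-remove loops over a mutable 'needed' list with sort-then-compare: sorted(first 9) and sorted(last 9) are each compared to the canonical sorted digit list.
import Mathlib
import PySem

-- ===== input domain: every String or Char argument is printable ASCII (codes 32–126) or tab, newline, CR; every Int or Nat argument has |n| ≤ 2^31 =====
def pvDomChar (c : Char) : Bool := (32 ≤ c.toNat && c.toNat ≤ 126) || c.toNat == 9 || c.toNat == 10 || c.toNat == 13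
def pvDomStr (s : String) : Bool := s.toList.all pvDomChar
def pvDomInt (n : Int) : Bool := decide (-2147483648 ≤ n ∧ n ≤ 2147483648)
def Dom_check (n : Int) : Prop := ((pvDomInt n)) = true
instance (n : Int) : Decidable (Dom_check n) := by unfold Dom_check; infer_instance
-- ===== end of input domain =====

-- B replaces A's two remove-loops by comparing each sorted 9-char slice with the sorted digit list (objective: simpler).

-- ===== PORT A =====
def numsL : List Char := ['1','2','3','4','5','6','7','8','9']

-- the 'for c in s: if c in needed: needed.remove(c) else: return False' loop (none = early False)
def removeLoop : List Char → List Char → Option (List Char)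
  | [], needed => some needed
  | c :: rest, needed =>
      if needed.contains c then removeLoop rest (needed.erase c) else none

def check (n : Int) : Bool :=
  let s := PySem.List.slice (PySem.Int.toChars n) none (some 9)
  match removeLoop s numsL with
  | none => false
  | some needed =>
    if needed.length ≠ 0 then false
    else
      let s2 := PySem.List.slice (PySem.Int.toChars n) (some (-9)) none
      match removeLoop s2 numsL with
      | none => false
      | some needed2 => needed2.length == 0

-- ===== PORT B =====
def check_alt (n : Int) : Bool :=
  let s := PySem.Int.toChars n
  (PySem.List.sorted (PySem.List.slice s none (some 9)) (fun x => x) false == numsL)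
  && (PySem.List.sorted (PySem.List.slice s (some (-9)) none) (fun x => x) false == numsL)

-- ===== PRECONDITION & SPEC =====
def Spec_check (n : Int) (out : Bool) : Prop := out = check_alt n
instance (n : Int) (out : Bool) : Decidable (Spec_check n out) := by unfold Spec_check; infer_instance

-- ===== CLAIM (what is proved, stated in full; the proofs are below) =====
def Claim_equal_check : Prop := ∀ (n : Int), Dom_check n → Spec_check n (check n)

-- ===== LEMMAS AND PROOFS =====

theorem removeLoop_some_perm (cs : List Char) :
    ∀ needed rem, removeLoop cs needed = some rem → needed.Perm (cs ++ rem) := by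
  induction cs with
  | nil => intro needed rem h; simp [removeLoop] at h; simp [h]
  | cons c rest ih =>
    intro needed rem h
    simp only [removeLoop] at h
    by_cases hc : c ∈ needed
    · rw [if_pos (by simpa using hc)] at h
      exact (List.perm_cons_erase hc).trans ((ih _ _ h).cons c)
    · rw [if_neg (by simpa using hc)] at h
      exact absurd h (by simp)

theorem removeLoop_of_perm (cs : List Char) :
    ∀ needed, cs.Perm needed → removeLoop cs needed = some [] := by
  induction cs with
  | nil => intro needed h; simp [removeLoop, (List.perm_nil.mp h.symm)]
  | cons c rest ih =>
    intro needed h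
    have hmem : c ∈ needed := h.subset (by simp)
    have hrest : rest.Perm (needed.erase c) :=
      (List.Perm.cons_inv (h.trans (List.perm_cons_erase hmem)))
    simp only [removeLoop, List.contains_iff_mem.mpr hmem, if_true]
    exact ih _ hrest

theorem loop_some_nil_iff (cs : List Char) :
    removeLoop cs numsL = some [] ↔ cs.Perm numsL := by
  constructor
  · intro h
    have := removeLoop_some_perm cs numsL [] h
    simpa using this.symm
  · exact removeLoop_of_perm cs numsL

theorem sorted_numsL : PySem.List.sorted numsL (fun x => x) false = numsL :=
  PySem.List.sorted_eq_self_of_pairwise numsL (fun x => x) (by decide)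

theorem sorted_eq_numsL_iff (cs : List Char) :
    ((PySem.List.sorted cs (fun x => x) false == numsL) = true) ↔ cs.Perm numsL := by
  rw [beq_iff_eq]
  constructor
  · intro h
    have : PySem.List.sorted cs (fun x => x) false = PySem.List.sorted numsL (fun x => x) false := by
      rw [h, sorted_numsL]
    exact (PySem.List.sorted_id_eq_sorted_id_iff_perm cs numsL).mp this
  · intro h
    rw [(PySem.List.sorted_id_eq_sorted_id_iff_perm cs numsL).mpr h, sorted_numsL]

theorem check_spec : Claim_equal_check := by
  intro n _
  unfold Spec_check check check_alt
  set s1 := PySem.List.slice (PySem.Int.toChars n) none (some 9) with hs1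
  set s2 := PySem.List.slice (PySem.Int.toChars n) (some (-9)) none with hs2
  rw [Bool.eq_iff_iff]
  simp only [Bool.and_eq_true, sorted_eq_numsL_iff]
  cases h1 : removeLoop s1 numsL with
  | none =>
    constructor
    · intro h; exact absurd h (by simp)
    · rintro ⟨hp1, _⟩
      rw [removeLoop_of_perm s1 numsL hp1] at h1; exact absurd h1 (by simp)
  | some needed =>
    cases needed with
    | cons a l =>
      dsimp only
      rw [if_pos (by simp)]
      constructor
      · intro h; exact absurd h (by simp)
      · rintro ⟨hp1, _⟩
        rw [removeLoop_of_perm s1 numsL hp1] at h1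
        exact absurd h1 (by simp)
    | nil =>
      dsimp only
      rw [if_neg (by simp)]
      have hp1 : s1.Perm numsL := (loop_some_nil_iff s1).mp h1
      cases h2 : removeLoop s2 numsL with
      | none =>
        dsimp only
        constructor
        · intro h; exact absurd h (by simp)
        · rintro ⟨_, hp2⟩
          rw [removeLoop_of_perm s2 numsL hp2] at h2; exact absurd h2 (by simp)
      | some needed2 =>
        dsimp only
        constructor
        · intro h
          have hn2 : needed2 = [] := by simpa using h
          exact ⟨hp1, (loop_some_nil_iff s2).mp (hn2 ▸ h2)⟩
        · rintro ⟨_, hp2⟩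
          rw [removeLoop_of_perm s2 numsL hp2] at h2
          have : needed2 = [] := by simpa using h2.symm
          simp [this]
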